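-- pv_equiv track=rewrite | github.com/HelloLee7/Pyready | Duplicate Numbers.py | check_unique_digits
-- ===== SOURCE A (Python) =====
-- def check_unique_digits(input_string):
--     """
--     입력 문자열이 0~9까지의 숫자가 각각 한 번씩만 사용되었는지 확인하는 함수
--
--     Args:
--         input_string: 0~9 사이의 숫자로 이루어진 문자열
--
--     Returns:
--         유효성 여부 (True/False)
--     """
--     if len(input_string) != 10:  # 입력 문자열의 길이가 10이 아니면
--         return False  # False 반환
--
--     digit_counts = {}  # 각 숫자의 등장 횟수를 저장할 딕셔너리 초기화
--     for digit in input_string:  # 입력 문자열의 각 문자에 대해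
--         if not digit.isdigit():  # 문자가 숫자가 아니면
--             return False  # False 반환
--         if digit in digit_counts:  # 이미 등장한 숫자이면
--             return False  # False 반환
--         digit_counts[digit] = 1  # 등장한 숫자를 딕셔너리에 추가하고 횟수 1로 설정
--
--     for i in range(10):  # 0부터 9까지 숫자에 대해
--         if str(i) not in digit_counts:  # 해당 숫자가 딕셔너리에 없으면 (등장하지 않았으면)
--             return False  # False 반환
--
--     return True  # 모든 조건을 만족하면 True 반환
-- ===== SOURCE B (Python) =====
-- def check_unique_digits(input_string):
--     return sorted(input_string) == list('0123456789')
-- ===== Notes on version B (the rewrite author's own statement) =====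
-- stated objective: simpler
-- what changed: Replaced the length guard, per-character isdigit check, dict-based duplicate tracking and digit-coverage scan by a single sort-and-compare against the list of the ten digit characters, which subsumes all four checks for string input.
import Mathlib
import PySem

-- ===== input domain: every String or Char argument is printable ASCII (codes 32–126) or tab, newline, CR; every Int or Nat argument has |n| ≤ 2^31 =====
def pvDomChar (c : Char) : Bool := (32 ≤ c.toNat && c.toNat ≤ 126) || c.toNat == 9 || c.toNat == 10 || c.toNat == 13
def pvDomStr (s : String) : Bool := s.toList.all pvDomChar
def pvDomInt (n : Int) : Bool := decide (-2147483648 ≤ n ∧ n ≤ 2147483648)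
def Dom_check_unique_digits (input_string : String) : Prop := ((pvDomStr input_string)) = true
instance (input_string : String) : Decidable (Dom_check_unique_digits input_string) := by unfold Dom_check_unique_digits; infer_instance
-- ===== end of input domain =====

-- B replaces A's length guard + isdigit loop + duplicate dict + 0..9 coverage scan by a single
-- sort-and-compare against list('0123456789'); simpler, same behaviour on every string.


-- ===== PORT A =====
-- the first for-loop of A: early 'return False' modelled as none, else the dict after the loop
def pvScanA : List Char → PySem.Dict Char Int → Option (PySem.Dict Char Int)
  | [], d => some d
  | c :: rest, d =>
    if !(PySem.Chars.isdigit c) then none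
    else if d.contains c then none
    else pvScanA rest (d.insert c 1)

def check_unique_digits (input_string : String) : Bool :=
  if PySem.Str.len input_string ≠ 10 then false
  else
    match pvScanA input_string.toList PySem.Dict.empty with
    | none => false
    | some d =>
      -- for i in range(10): if str(i) not in digit_counts: return False  (keys are the digit chars)
      (PySem.List.pyRange 0 10 1).all (fun i => d.contains (Char.ofNat (48 + i.toNat)))

-- ===== PORT B =====
def check_unique_digits_alt (input_string : String) : Bool :=
  decide ((PySem.List.sorted input_string.toList (fun c => c)) = "0123456789".toList)

-- ===== PRECONDITION & SPEC =====
def Spec_check_unique_digits (input_string : String) (out : Bool) : Prop := out = check_unique_digits_alt input_string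
instance (input_string : String) (out : Bool) : Decidable (Spec_check_unique_digits input_string out) := by unfold Spec_check_unique_digits; infer_instance

-- ===== CLAIM (what is proved, stated in full; the proofs are below) =====
def Claim_equal_check_unique_digits : Prop := ∀ (input_string : String), Dom_check_unique_digits input_string → Spec_check_unique_digits input_string (check_unique_digits input_string)

-- ===== LEMMAS AND PROOFS =====

def pvDigits : List Char := ['0','1','2','3','4','5','6','7','8','9']

-- the scan succeeds iff every char is a digit, none repeats, and none was already a key
theorem pvScanA_isSome (cs : List Char) : ∀ (d : PySem.Dict Char Int),
    (pvScanA cs d).isSome = true ↔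
      (∀ c ∈ cs, PySem.Chars.isdigit c = true) ∧ cs.Nodup ∧ (∀ c ∈ cs, d.contains c = false) := by
  induction cs with
  | nil => intro d; simp [pvScanA]
  | cons c rest ih =>
    intro d
    simp only [pvScanA]
    by_cases hd : PySem.Chars.isdigit c = true
    · by_cases hc : d.contains c = true
      · simp [hd, hc]
      · have hc' : d.contains c = false := by simpa using hc
        rw [if_neg (by simp [hd]), if_neg hc, ih]
        constructor
        · rintro ⟨h1, h2, h3⟩
          refine ⟨?_, ?_, ?_⟩
          · intro x hx; rcases List.mem_cons.mp hx with rfl | hx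
            · exact hd
            · exact h1 x hx
          · refine List.nodup_cons.mpr ⟨?_, h2⟩
            intro hmem
            have := h3 c hmem
            simp at this
          · intro x hx; rcases List.mem_cons.mp hx with rfl | hx
            · exact hc'
            · have := h3 x hx
              simp [PySem.Dict.contains_insert] at this
              exact this.2
        · rintro ⟨h1, h2, h3⟩
          rcases List.nodup_cons.mp h2 with ⟨hnc, h2'⟩
          refine ⟨fun x hx => h1 x (.tail _ hx), h2', fun x hx => ?_⟩
          rw [PySem.Dict.contains_insert]
          simp only [Bool.or_eq_false_iff]
          exact ⟨by simpa using fun h : x = c => hnc (h ▸ hx), h3 x (.tail _ hx)⟩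
    · simp [hd]

-- after a successful scan, the dict's keys are exactly the scanned characters (plus the old keys)
theorem pvScanA_contains (cs : List Char) : ∀ (d d' : PySem.Dict Char Int),
    pvScanA cs d = some d' → ∀ x, d'.contains x = (d.contains x || decide (x ∈ cs)) := by
  induction cs with
  | nil => intro d d' h x; simp [pvScanA] at h; simp [h]
  | cons c rest ih =>
    intro d d' h x
    simp only [pvScanA] at h
    by_cases h1 : (!PySem.Chars.isdigit c) = true
    · rw [if_pos h1] at h; cases h
    · rw [if_neg h1] at h
      by_cases h2 : d.contains c = true
      · rw [if_pos h2] at h; cases h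
      · rw [if_neg h2] at h
        rw [ih _ _ h x, PySem.Dict.contains_insert]
        by_cases hx : x = c
        · subst hx; simp [h2]
        · rw [beq_eq_false_iff_ne.mpr hx]; simp [hx]

-- A = true iff: length 10, all digits, no duplicates, and every digit 0..9 occurs
theorem check_unique_digits_iff (s : String) :
    check_unique_digits s = true ↔
      s.toList.length = 10 ∧ (∀ c ∈ s.toList, PySem.Chars.isdigit c = true) ∧
        s.toList.Nodup ∧ (∀ c ∈ pvDigits, c ∈ s.toList) := by
  unfold check_unique_digits
  rw [PySem.Str.len_eq]
  by_cases hlen : (s.toList.length : Int) = 10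
  · have hlenN : s.toList.length = 10 := by exact_mod_cast hlen
    have hlen2 : (s.length : Int) = 10 := by simpa using hlen
    rw [if_neg (by simp [hlen2])]
    rcases h : pvScanA s.toList PySem.Dict.empty with _ | d
    · constructor
      · intro h'; exact absurd h' (by simp)
      · rintro ⟨-, h1, h2, -⟩
        have hs : (pvScanA s.toList PySem.Dict.empty).isSome = true :=
          (pvScanA_isSome _ _).mpr ⟨h1, h2, fun c _ => by simp⟩
        rw [h] at hs; exact absurd hs (by simp)
    · have hcont := pvScanA_contains _ _ _ h
      have hsome : (pvScanA s.toList PySem.Dict.empty).isSome = true := by rw [h]; rfl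
      rcases (pvScanA_isSome _ _).mp hsome with ⟨h1, h2, -⟩
      have hall : ∀ x, d.contains x = decide (x ∈ s.toList) := by
        intro x; rw [hcont x]; simp
      have hmap : (PySem.List.pyRange 0 10 1).map (fun i => Char.ofNat (48 + i.toNat)) = pvDigits := by
        decide
      have hform : ((PySem.List.pyRange 0 10 1).all (fun i => d.contains (Char.ofNat (48 + i.toNat))))
          = pvDigits.all (fun c => decide (c ∈ s.toList)) := by
        rw [← hmap, List.all_map]
        simp only [Function.comp_def, hall]
      show ((PySem.List.pyRange 0 10 1).all fun i => d.contains (Char.ofNat (48 + i.toNat))) = true ↔ _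
      constructor
      · intro hA
        rw [hform] at hA
        refine ⟨hlenN, h1, h2, ?_⟩
        simpa [List.all_eq_true] using hA
      · rintro ⟨-, -, -, hcov⟩
        rw [hform]
        simpa [List.all_eq_true] using hcov
  · have hlen2 : ¬ (s.length : Int) = 10 := by simpa using hlen
    rw [if_pos (by simp [hlen2])]
    refine ⟨fun h' => absurd h' (by simp), fun h' => absurd h'.1 (by exact_mod_cast hlen)⟩

-- B = true iff the characters are a permutation of '0'..'9'
set_option maxRecDepth 8192 in
theorem check_unique_digits_alt_iff (s : String) :
    check_unique_digits_alt s = true ↔ s.toList.Perm pvDigits := by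
  unfold check_unique_digits_alt
  have hdig : "0123456789".toList = pvDigits := by decide
  rw [hdig, decide_eq_true_eq]
  have hsorted : PySem.List.sorted pvDigits (fun c => c) = pvDigits :=
    PySem.List.sorted_eq_self_of_pairwise _ _ (by decide)
  constructor
  · intro h
    rw [← hsorted, PySem.List.sorted_id_eq_sorted_id_iff_perm] at h
    exact h
  · intro h
    rw [← hsorted, PySem.List.sorted_id_eq_sorted_id_iff_perm]
    exact h

-- the two characterizations coincide
theorem perm_iff_props (l : List Char) :
    l.Perm pvDigits ↔
      (l.length = 10 ∧ (∀ c ∈ l, PySem.Chars.isdigit c = true) ∧ l.Nodup ∧ (∀ c ∈ pvDigits, c ∈ l)) := by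
  constructor
  · intro h
    refine ⟨by simpa using h.length_eq, ?_, h.nodup_iff.mpr (by decide), fun c hc => (h.mem_iff).mpr hc⟩
    intro c hc
    have hc' : c ∈ pvDigits := h.mem_iff.mp hc
    fin_cases hc' <;> decide
  · rintro ⟨hlen, -, -, hsub⟩
    have hnd : pvDigits.Nodup := by decide
    have hsp : pvDigits.Subperm l := hnd.subperm hsub
    exact (hsp.perm_of_length_le (by simp [hlen, pvDigits])).symm

-- ===== VERDICT (by name: the statement is the Claim_ definition above) =====
theorem check_unique_digits_spec : Claim_equal_check_unique_digits := by
  intro s _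
  unfold Spec_check_unique_digits
  rcases hB : check_unique_digits_alt s with _ | _
  · rcases hA : check_unique_digits s with _ | _
    · rfl
    · exfalso
      have := (check_unique_digits_alt_iff s).mpr
        ((perm_iff_props _).mpr ((check_unique_digits_iff s).mp hA))
      rw [hB] at this; exact Bool.false_ne_true this
  · exact (check_unique_digits_iff s).mpr
      ((perm_iff_props _).mp ((check_unique_digits_alt_iff s).mp hB))
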